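-- pv_equiv track=rewrite | github.com/iamieht/codewars-python | 7kyu/reverse_words.py | group_strings_into_lists
-- ===== SOURCE A (Python) =====
-- def group_strings_into_lists(text):
--     final_list = []
--     temp_list = []
--
--     for char in text:
--         if char != ' ':
--             temp_list.append(char)
--         else:
--             final_list.append(temp_list)
--             final_list += [[char]]
--             temp_list = []
--
--     final_list.append(temp_list)
--     return final_list
-- ===== SOURCE B (Python) =====
-- def group_strings_into_lists(text):
--     result = []
--     for i, word in enumerate(text.split(' ')):
--         if i:
--             result.append([' '])
--         result.append(list(word))
--     return result
-- ===== Notes on version B (the rewrite author's own statement) =====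
-- stated objective: simpler
-- what changed: B replaces A's manual char-by-char state machine (accumulating a temp word list and flushing it on each space) with a single str.split on the space character followed by one interleaving loop that inserts a singleton space list before every word after the first.
import Mathlib
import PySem

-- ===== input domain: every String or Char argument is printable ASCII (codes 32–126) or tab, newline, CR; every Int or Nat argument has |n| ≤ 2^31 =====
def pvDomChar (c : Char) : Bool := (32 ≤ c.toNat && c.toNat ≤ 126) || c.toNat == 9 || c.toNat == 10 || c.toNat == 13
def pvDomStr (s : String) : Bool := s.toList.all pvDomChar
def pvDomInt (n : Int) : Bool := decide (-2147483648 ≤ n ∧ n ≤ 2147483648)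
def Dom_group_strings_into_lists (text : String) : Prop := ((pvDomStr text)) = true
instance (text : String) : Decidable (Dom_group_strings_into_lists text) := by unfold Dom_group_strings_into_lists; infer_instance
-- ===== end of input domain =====

-- B builds text.split(' ') once and interleaves [' '] between the words, instead of A's
-- char-by-char state machine; objective: simpler.

-- ===== PORT A =====
def group_strings_into_lists (text : String) : List (List String) :=
  let st := text.toList.foldl
    (fun (st : List (List String) × List String) c =>
      if c ≠ ' ' then (st.1, st.2 ++ [c.toString])
      else (st.1 ++ [st.2] ++ [[c.toString]], []))
    ([], [])
  st.1 ++ [st.2]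

-- ===== PORT B =====
def group_strings_into_lists_alt (text : String) : List (List String) :=
  (PySem.List.enumerate (PySem.Chars.splitOn text.toList " ".toList)).foldl
    (fun acc p => (if p.1 ≠ 0 then acc ++ [[" "]] else acc) ++ [p.2.map Char.toString]) []

-- ===== PRECONDITION & SPEC =====
def Spec_group_strings_into_lists (text : String) (out : List (List String)) : Prop := out = group_strings_into_lists_alt text
instance (text : String) (out : List (List String)) : Decidable (Spec_group_strings_into_lists text out) := by unfold Spec_group_strings_into_lists; infer_instance

-- ===== CLAIM (what is proved, stated in full; the proofs are below) =====
def Claim_equal_group_strings_into_lists : Prop := ∀ (text : String), Dom_group_strings_into_lists text → Spec_group_strings_into_lists text (group_strings_into_lists text)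

-- ===== LEMMAS AND PROOFS =====

/-- Functional form of splitting on a single space (accumulator `cur` is reversed). -/
def pvSplitF : List Char → List Char → List (List Char)
  | cur, [] => [cur.reverse]
  | cur, c :: rest => if c = ' ' then cur.reverse :: pvSplitF [] rest else pvSplitF (c :: cur) rest

/-- Functional form of A's loop result (words as lists of 1-char strings, spaces interleaved). -/
def pvGroup : List Char → List Char → List (List String)
  | cur, [] => [cur.reverse.map Char.toString]
  | cur, c :: rest =>
      if c = ' ' then cur.reverse.map Char.toString :: [" "] :: pvGroup [] rest
      else pvGroup (c :: cur) rest

lemma pvSplitF_ne_nil (l cur : List Char) : pvSplitF cur l ≠ [] := by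
  induction l generalizing cur with
  | nil => simp [pvSplitF]
  | cons c rest ih => simp only [pvSplitF]; split_ifs <;> simp [ih]

lemma splitOn_go_spec (l : List Char) (fuel : Nat) (cur : List Char) (acc : List (List Char))
    (h : l.length < fuel) :
    PySem.Chars.splitOn.go [' '] fuel l cur acc = acc.reverse ++ pvSplitF cur l := by
  induction l generalizing fuel cur acc with
  | nil =>
    cases fuel with
    | zero => omega
    | succ f => simp [PySem.Chars.splitOn.go, pvSplitF]
  | cons c rest ih =>
    cases fuel with
    | zero => omega
    | succ f =>
      by_cases hc : c = ' '
      · subst hc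
        rw [PySem.Chars.splitOn.go]
        rw [if_pos (by simp [List.isPrefixOf] : ([' '].isPrefixOf (' ' :: rest)) = true)]
        rw [show List.drop ([' '] : List Char).length (' ' :: rest) = rest from rfl]
        rw [ih f [] ((cur.reverse) :: acc) (by simp at h; omega)]
        simp [pvSplitF]
      · rw [PySem.Chars.splitOn.go]
        have : ([' '].isPrefixOf (c :: rest)) = false := by
          simp [List.isPrefixOf]; exact fun h' => hc h'.symm
        simp only [this, Bool.false_eq_true, if_false]
        rw [ih f (c :: cur) acc (by simpa using Nat.lt_of_succ_lt_succ h)]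
        simp [pvSplitF, hc]

lemma splitOn_eq_pvSplitF (l : List Char) :
    PySem.Chars.splitOn l [' '] = pvSplitF [] l := by
  have := splitOn_go_spec l (l.length + 1) [] [] (by omega)
  simpa [PySem.Chars.splitOn] using this

/-- A's loop, finished by appending the pending word, computes `pvGroup`. -/
lemma a_loop_spec (l : List Char) (final : List (List String)) (cur : List Char) :
    (let st := l.foldl
      (fun (st : List (List String) × List String) c =>
        if c ≠ ' ' then (st.1, st.2 ++ [c.toString])
        else (st.1 ++ [st.2] ++ [[c.toString]], []))
      (final, cur.reverse.map Char.toString)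
     st.1 ++ [st.2]) = final ++ pvGroup cur l := by
  induction l generalizing final cur with
  | nil => simp [pvGroup]
  | cons c rest ih =>
    by_cases hc : c = ' '
    · subst hc
      simp only [List.foldl_cons]
      rw [if_neg (by simp)]
      have := ih (final ++ [cur.reverse.map Char.toString] ++ [[(' ' : Char).toString]]) []
      simp only [List.reverse_nil, List.map_nil] at this
      simp only [Char.toString] at this ⊢
      rw [this]
      simp only [pvGroup, if_pos rfl, List.append_assoc, List.cons_append, List.nil_append,
        List.append_cancel_left_eq]
      rfl
    · simp only [List.foldl_cons]
      rw [if_pos (by simp [hc])]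
      have := ih final (c :: cur)
      simp only [List.reverse_cons, List.map_append, List.map_cons, List.map_nil] at this
      rw [this]
      simp [pvGroup, hc]

lemma b_fold_spec (ws : List (List Char)) (i : Int) (acc : List (List String)) (hi : 1 ≤ i) :
    (PySem.List.enumerate ws i).foldl
      (fun acc p => (if p.1 ≠ 0 then acc ++ [[" "]] else acc) ++ [p.2.map Char.toString]) acc
    = acc ++ ws.flatMap (fun w => [[" "], w.map Char.toString]) := by
  induction ws generalizing i acc with
  | nil => simp [PySem.List.enumerate]
  | cons w ws ih =>
    rw [PySem.List.enumerate]
    simp only [List.foldl_cons, if_pos (by omega : i ≠ 0)]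
    rw [ih (i + 1) _ (by omega)]
    simp

lemma toB_pvSplitF (l cur : List Char) :
    (pvSplitF cur l).head!.map Char.toString
      :: (pvSplitF cur l).tail.flatMap (fun w => [[" "], w.map Char.toString])
    = pvGroup cur l := by
  induction l generalizing cur with
  | nil => simp [pvSplitF, pvGroup]
  | cons c rest ih =>
    by_cases hc : c = ' '
    · subst hc
      simp only [pvSplitF, pvGroup, if_pos rfl, List.head!_cons, List.tail_cons]
      obtain ⟨u, us, hu⟩ : ∃ u us, pvSplitF ([] : List Char) rest = u :: us := by
        cases h : pvSplitF ([] : List Char) rest with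
        | nil => exact absurd h (pvSplitF_ne_nil rest [])
        | cons u us => exact ⟨u, us, rfl⟩
      have := ih ([] : List Char)
      rw [hu] at this ⊢
      simp only [List.head!_cons, List.tail_cons] at this
      simp [this.symm]
    · simp only [pvSplitF, pvGroup, if_neg hc]
      exact ih (c :: cur)

-- ===== VERDICT (by name: the statement is the Claim_ definition above) =====
theorem group_strings_into_lists_spec : Claim_equal_group_strings_into_lists := by
  unfold Claim_equal_group_strings_into_lists Spec_group_strings_into_lists
  intro text _
  have hA : group_strings_into_lists text = pvGroup [] text.toList := by
    have := a_loop_spec text.toList [] []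
    simpa [group_strings_into_lists] using this
  have hsplit : PySem.Chars.splitOn text.toList " ".toList = pvSplitF [] text.toList := by
    simpa using splitOn_eq_pvSplitF text.toList
  obtain ⟨u, us, hu⟩ : ∃ u us, pvSplitF ([] : List Char) text.toList = u :: us := by
    cases h : pvSplitF ([] : List Char) text.toList with
    | nil => exact absurd h (pvSplitF_ne_nil text.toList [])
    | cons u us => exact ⟨u, us, rfl⟩
  have hB : group_strings_into_lists_alt text = pvGroup [] text.toList := by
    unfold group_strings_into_lists_alt
    rw [hsplit, hu, PySem.List.enumerate]
    simp only [List.foldl_cons]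
    rw [if_neg (by simp), show ((0:Int)+1) = 1 from rfl, b_fold_spec us 1 _ (by omega)]
    have := toB_pvSplitF text.toList []
    rw [hu] at this
    simpa using this
  rw [hA, hB]
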